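-- pv_equiv track=rewrite | github.com/Rashad-lab/Gene-level-frameshifting | Frameshift location and impact/frameshift_loci.py | flag_stall_codon_motifs
-- ===== SOURCE A (Python) =====
-- from typing import Optional, Tuple, List
--
-- def flag_stall_codon_motifs(codons: List[str],
--                             proline_runs=(2,3),
--                             polybasic_min=6,
--                             de_to_p=True) -> dict:
--     """
--     Quick in-frame codon motif flags.
--     Returns dict of booleans + counts.
--     """
--     aa = []
--     # Minimal 1-letter AA mapping for fast checks
--     aa_map = {
--         "CCU":"P","CCC":"P","CCA":"P","CCG":"P",
--         "AAU":"N","AAC":"N","GAU":"D","GAC":"D",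
--         "GAA":"E","GAG":"E",
--         "GGU":"G","GGC":"G","GGA":"G","GGG":"G",
--         "AAA":"K","AAG":"K",
--         "CGU":"R","CGC":"R","CGA":"R","CGG":"R","AGA":"R","AGG":"R",
--         # others collapsed
--     }
--     for c in codons:
--         aa.append(aa_map.get(c, "X"))
--
--     # Proline runs
--     pro_flags = {}
--     for r in proline_runs:
--         pro_flags[f"has_Px{r}"] = ("P"*r in "".join(aa))
--
--     # Polybasic K/R runs
--     k_run = "K"*polybasic_min
--     r_run = "R"*polybasic_min
--     has_Krun = (k_run in "".join(aa)) if polybasic_min > 1 else False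
--     has_Rrun = (r_run in "".join(aa)) if polybasic_min > 1 else False
--
--     # D/E → P transition (any acidic immediately followed by Pro)
--     has_DE_to_P = False
--     if de_to_p:
--         for i in range(len(aa)-1):
--             if aa[i] in ("D","E") and aa[i+1] == "P":
--                 has_DE_to_P = True
--                 break
--
--     out = dict(
--         **pro_flags,
--         has_polyK=has_Krun,
--         has_polyR=has_Rrun,
--         has_DE_to_P=has_DE_to_P
--     )
--     return out
-- ===== SOURCE B (Python) =====
-- def flag_stall_codon_motifs(codons,
--                             proline_runs=(2,3),
--                             polybasic_min=6,
--                             de_to_p=True) -> dict: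
--     """One pass over codons: track current/max run lengths of P, K, R and the
--     previous amino acid (for D/E -> P); flags are derived from the run maxima."""
--     aa_map = {
--         "CCU":"P","CCC":"P","CCA":"P","CCG":"P",
--         "AAU":"N","AAC":"N","GAU":"D","GAC":"D",
--         "GAA":"E","GAG":"E",
--         "GGU":"G","GGC":"G","GGA":"G","GGG":"G",
--         "AAA":"K","AAG":"K",
--         "CGU":"R","CGC":"R","CGA":"R","CGG":"R","AGA":"R","AGG":"R",
--     }
--     cur_p = max_p = cur_k = max_k = cur_r = max_r = 0
--     prev = ""
--     de_flag = False
--     for c in codons: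
--         a = aa_map.get(c, "X")
--         cur_p = cur_p + 1 if a == "P" else 0
--         max_p = max(max_p, cur_p)
--         cur_k = cur_k + 1 if a == "K" else 0
--         max_k = max(max_k, cur_k)
--         cur_r = cur_r + 1 if a == "R" else 0
--         max_r = max(max_r, cur_r)
--         if de_to_p and prev in ("D", "E") and a == "P":
--             de_flag = True
--         prev = a
--     out = {}
--     for r in proline_runs:
--         out[f"has_Px{r}"] = max_p >= r
--     out["has_polyK"] = polybasic_min > 1 and max_k >= polybasic_min
--     out["has_polyR"] = polybasic_min > 1 and max_r >= polybasic_min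
--     out["has_DE_to_P"] = de_flag
--     return out
-- ===== Notes on version B (the rewrite author's own statement) =====
-- stated objective: faster
-- what changed: B replaces the repeated join-and-substring searches ('P'*r in ''.join(aa) per r, 'K'*n/'R'*n in ..., plus a separate index loop for D/E->P) by a single pass over codons that maintains current/maximum consecutive-run lengths for P, K and R and the previous amino acid, deriving every flag from the run maxima.
import Mathlib
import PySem

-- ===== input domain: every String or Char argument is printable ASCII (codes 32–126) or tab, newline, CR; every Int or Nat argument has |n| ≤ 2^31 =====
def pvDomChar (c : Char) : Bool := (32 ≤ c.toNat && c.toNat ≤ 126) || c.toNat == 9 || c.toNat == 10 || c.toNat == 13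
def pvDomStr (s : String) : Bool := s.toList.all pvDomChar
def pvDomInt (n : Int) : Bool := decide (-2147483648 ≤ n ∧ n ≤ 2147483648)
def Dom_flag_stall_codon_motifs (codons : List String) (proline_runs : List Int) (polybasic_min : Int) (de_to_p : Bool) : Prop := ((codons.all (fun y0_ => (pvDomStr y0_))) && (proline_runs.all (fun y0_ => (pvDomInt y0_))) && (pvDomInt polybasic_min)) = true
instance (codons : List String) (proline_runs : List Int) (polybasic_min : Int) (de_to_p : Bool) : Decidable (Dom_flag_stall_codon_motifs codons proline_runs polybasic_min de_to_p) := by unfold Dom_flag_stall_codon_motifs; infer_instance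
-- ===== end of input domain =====

-- B replaces A's join/substring searches by one pass maintaining run maxima for P/K/R
-- and the previous amino acid (objective: alternative algorithm, same results).

-- ===== PORT A =====
-- the aa_map.get(c, "X") lookup (shared codon table; amino acids are 1-char strings → Char)
def pvAA (c : String) : Char :=
  match c with
  | "CCU" => 'P' | "CCC" => 'P' | "CCA" => 'P' | "CCG" => 'P'
  | "AAU" => 'N' | "AAC" => 'N' | "GAU" => 'D' | "GAC" => 'D'
  | "GAA" => 'E' | "GAG" => 'E'
  | "GGU" => 'G' | "GGC" => 'G' | "GGA" => 'G' | "GGG" => 'G'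
  | "AAA" => 'K' | "AAG" => 'K'
  | "CGU" => 'R' | "CGC" => 'R' | "CGA" => 'R' | "CGG" => 'R' | "AGA" => 'R' | "AGG" => 'R'
  | _ => 'X'

-- A's 'for i in range(len(aa)-1): … break' (indices are in range, so getD is exact)
def pvDeScanA (aa : List Char) (i : Nat) : Bool :=
  if i + 1 < aa.length then
    if (aa.getD i 'X' == 'D' || aa.getD i 'X' == 'E') && aa.getD (i+1) 'X' == 'P' then true
    else pvDeScanA aa (i+1)
  else false
termination_by aa.length - i

-- "".join(aa) of one-character strings is exactly the char list aa, so `sub in join`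
-- is PySem.Chars.isIn on aa; "P"*r is PySem.List.pyRepeat ['P'] r.
def flag_stall_codon_motifs (codons : List String) (proline_runs : List Int) (polybasic_min : Int) (de_to_p : Bool) : List (String × Bool) :=
  let aa : List Char := codons.foldl (fun acc c => acc ++ [pvAA c]) []
  let pro_flags : PySem.Dict String Bool :=
    proline_runs.foldl (fun d r =>
      d.insert ("has_Px" ++ PySem.Int.toStr r)
        (PySem.Chars.isIn (PySem.List.pyRepeat ['P'] r) aa)) PySem.Dict.empty
  let k_run := PySem.List.pyRepeat ['K'] polybasic_min
  let r_run := PySem.List.pyRepeat ['R'] polybasic_min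
  let has_Krun := if polybasic_min > 1 then PySem.Chars.isIn k_run aa else false
  let has_Rrun := if polybasic_min > 1 then PySem.Chars.isIn r_run aa else false
  let has_DE_to_P := if de_to_p then pvDeScanA aa 0 else false
  (((pro_flags.insert "has_polyK" has_Krun).insert "has_polyR" has_Rrun).insert
      "has_DE_to_P" has_DE_to_P).items

-- ===== PORT B =====
-- cur/max run update for one target amino acid (B's cur_x/max_x pair)
def pvStepRun (a : Char) (p : Nat × Nat) (c : Char) : Nat × Nat :=
  let cur := if c == a then p.1 + 1 else 0
  (cur, max p.2 cur)

-- B's (prev, de_flag) update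
def pvStepDE (de_to_p : Bool) (p : Char × Bool) (c : Char) : Char × Bool :=
  (c, p.2 || (de_to_p && (p.1 == 'D' || p.1 == 'E') && c == 'P'))

-- prev = "" initially: '_' is a sentinel never produced by pvAA
def flag_stall_codon_motifs_alt (codons : List String) (proline_runs : List Int) (polybasic_min : Int) (de_to_p : Bool) : List (String × Bool) :=
  let s := codons.foldl
    (fun (st : (Nat × Nat) × (Nat × Nat) × (Nat × Nat) × (Char × Bool)) c =>
      (pvStepRun 'P' st.1 (pvAA c),
        pvStepRun 'K' st.2.1 (pvAA c),
        pvStepRun 'R' st.2.2.1 (pvAA c),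
        pvStepDE de_to_p st.2.2.2 (pvAA c)))
    ((0, 0), (0, 0), (0, 0), ('_', false))
  let out : PySem.Dict String Bool :=
    proline_runs.foldl (fun d r =>
      d.insert ("has_Px" ++ PySem.Int.toStr r) (decide (r ≤ (s.1.2 : Int)))) PySem.Dict.empty
  (((out.insert "has_polyK"
        (decide (1 < polybasic_min) && decide (polybasic_min ≤ (s.2.1.2 : Int)))).insert
      "has_polyR"
        (decide (1 < polybasic_min) && decide (polybasic_min ≤ (s.2.2.1.2 : Int)))).insert
    "has_DE_to_P" s.2.2.2.2).items

-- ===== PRECONDITION & SPEC =====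
def Spec_flag_stall_codon_motifs (codons : List String) (proline_runs : List Int) (polybasic_min : Int) (de_to_p : Bool) (out : List (String × Bool)) : Prop := out = flag_stall_codon_motifs_alt codons proline_runs polybasic_min de_to_p
instance (codons : List String) (proline_runs : List Int) (polybasic_min : Int) (de_to_p : Bool) (out : List (String × Bool)) : Decidable (Spec_flag_stall_codon_motifs codons proline_runs polybasic_min de_to_p out) := by unfold Spec_flag_stall_codon_motifs; infer_instance

-- ===== CLAIM (what is proved, stated in full; the proofs are below) =====
def Claim_equal_flag_stall_codon_motifs : Prop := ∀ (codons : List String) (proline_runs : List Int) (polybasic_min : Int) (de_to_p : Bool), Dom_flag_stall_codon_motifs codons proline_runs polybasic_min de_to_p → Spec_flag_stall_codon_motifs codons proline_runs polybasic_min de_to_p (flag_stall_codon_motifs codons proline_runs polybasic_min de_to_p)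

-- ===== LEMMAS AND PROOFS =====

-- the run-maximum fold for one amino acid
def pvRunFold (a : Char) (l : List Char) : Nat × Nat := l.foldl (pvStepRun a) (0, 0)

-- length of the maximal all-`a` suffix
def pvSuff (a : Char) (l : List Char) : Nat := (l.reverse.takeWhile (· == a)).length

lemma pvA_aa_eq (codons : List String) :
    codons.foldl (fun acc c => acc ++ [pvAA c]) [] = codons.map pvAA := by
  suffices h : ∀ (init : List Char), codons.foldl (fun acc c => acc ++ [pvAA c]) init = init ++ codons.map pvAA by
    simpa using h []
  induction codons with
  | nil => simp
  | cons c t ih => intro init; simp [List.foldl_cons, ih, List.append_assoc]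

lemma pvReplicate_prefix_iff (a : Char) (n : Nat) (l : List Char) :
    List.replicate n a <+: l ↔ n ≤ (l.takeWhile (· == a)).length := by
  induction l generalizing n with
  | nil =>
    cases n with
    | zero => simp
    | succ m => simp [List.replicate_succ]
  | cons c t ih =>
    cases n with
    | zero => simp
    | succ m =>
      rw [List.replicate_succ, List.cons_prefix_cons]
      by_cases hc : c = a
      · subst hc
        simp [List.takeWhile_cons, ih, Nat.succ_le_succ_iff]
      · simp [List.takeWhile_cons, beq_iff_eq, hc]
        intro h
        exact absurd h.symm hc

lemma pvReplicate_suffix_iff (a : Char) (n : Nat) (l : List Char) :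
    List.replicate n a <:+ l ↔ n ≤ pvSuff a l := by
  rw [← List.reverse_prefix, List.reverse_replicate, pvSuff, pvReplicate_prefix_iff]

lemma pvSuff_concat (a c : Char) (l : List Char) :
    pvSuff a (l ++ [c]) = if c == a then pvSuff a l + 1 else 0 := by
  by_cases hc : c = a <;> simp [pvSuff, List.takeWhile_cons, hc]

lemma pvInfix_concat_iff (t l : List Char) (c : Char) :
    t <:+: l ++ [c] ↔ t <:+: l ∨ t <:+ l ++ [c] := by
  constructor
  · rintro ⟨s, u, hsu⟩
    rcases List.eq_nil_or_concat u with rfl | ⟨u', d, rfl⟩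
    · exact Or.inr ⟨s, by simpa using hsu⟩
    · left
      refine ⟨s, u', ?_⟩
      have := congrArg List.dropLast hsu
      simpa [← List.append_assoc, List.dropLast_concat] using this
  · rintro (h | ⟨s, hs⟩)
    · exact h.trans ⟨[], [c], by simp⟩
    · exact ⟨s, [], by simpa using hs⟩

lemma pvRunFold_concat (a c : Char) (l : List Char) :
    pvRunFold a (l ++ [c]) = pvStepRun a (pvRunFold a l) c := by
  simp [pvRunFold, List.foldl_append]

lemma pvRunFold_spec (a : Char) (l : List Char) :
    (pvRunFold a l).1 = pvSuff a l ∧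
      ∀ n : Nat, (List.replicate n a <:+: l ↔ n ≤ (pvRunFold a l).2) := by
  induction l using List.reverseRecOn with
  | nil =>
    refine ⟨rfl, fun n => ?_⟩
    simp [pvRunFold, List.infix_nil, List.replicate_eq_nil_iff, Nat.le_zero]
  | append_singleton l c ih =>
    obtain ⟨ih1, ih2⟩ := ih
    rw [pvRunFold_concat]
    constructor
    · by_cases hc : c = a <;> simp [pvStepRun, pvSuff_concat, hc, ih1]
    · intro n
      rw [pvInfix_concat_iff, pvReplicate_suffix_iff, pvSuff_concat, ih2]
      simp only [pvStepRun, ← ih1]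
      by_cases hc : (c == a) = true <;> simp [hc, le_max_iff, Nat.le_zero] <;> omega

-- the key value lemma: A's substring test equals B's run-maximum comparison
lemma pvIsIn_repeat_eq (a : Char) (r : Int) (l : List Char) :
    PySem.Chars.isIn (PySem.List.pyRepeat [a] r) l = decide (r ≤ ((pvRunFold a l).2 : Int)) := by
  rw [PySem.List.pyRepeat_singleton]
  by_cases hr : r ≤ 0
  · have h0 : r.toNat = 0 := Int.toNat_of_nonpos hr
    have : r ≤ ((pvRunFold a l).2 : Int) := le_trans hr (Int.natCast_nonneg _)
    simp [h0, (PySem.Chars.isIn_iff_infix _ _).mpr List.nil_infix, this]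
  · have hr : (0:Int) < r := by omega
    have hiff := (pvRunFold_spec a l).2 r.toNat
    have hr' : (r.toNat : Int) = r := Int.toNat_of_nonneg hr.le
    by_cases h : List.replicate r.toNat a <:+: l
    · have := hiff.mp h
      rw [(PySem.Chars.isIn_iff_infix _ _).mpr h]
      have : r ≤ ((pvRunFold a l).2 : Int) := by
        rw [← hr']; exact_mod_cast this
      simp [this]
    · rw [(PySem.Chars.isIn_eq_false_iff _ _).mpr h]
      have : ¬ r ≤ ((pvRunFold a l).2 : Int) := by
        intro hle
        exact h (hiff.mpr (by omega))
      simp [this]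

-- reference adjacent-pair scan
def pvScanPairs : List Char → Bool
  | a :: b :: t => ((a == 'D' || a == 'E') && b == 'P') || pvScanPairs (b :: t)
  | _ => false

lemma pvDeScanA_eq_scanPairs (aa : List Char) (i : Nat) :
    pvDeScanA aa i = pvScanPairs (aa.drop i) := by
  rw [pvDeScanA]
  by_cases h : i + 1 < aa.length
  · have hi : i < aa.length := by omega
    have h1 : aa.drop i = aa[i] :: aa.drop (i + 1) := List.drop_eq_getElem_cons hi
    have h2 : aa.drop (i + 1) = aa[i + 1] :: aa.drop (i + 2) := List.drop_eq_getElem_cons h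
    have hg1 : aa.getD i 'X' = aa[i] := by simp [List.getD_eq_getElem?_getD, hi]
    have hg2 : aa.getD (i + 1) 'X' = aa[i + 1] := by simp [List.getD_eq_getElem?_getD, h]
    rw [h1, h2, pvScanPairs, ← h2, hg1, hg2]
    by_cases hc : ((aa[i] == 'D' || aa[i] == 'E') && aa[i + 1] == 'P') = true
    · simp [h, hc]
    · simp only [h, if_true, Bool.not_eq_true] at *
      simp [hc, pvDeScanA_eq_scanPairs aa (i + 1)]
  · have hzero : pvScanPairs (aa.drop i) = false := by
      match hdrop : aa.drop i with
      | [] => rfl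
      | [a] => rfl
      | a :: b :: t =>
        have hl := congrArg List.length hdrop
        simp at hl
        omega
    simp [h, hzero]
termination_by aa.length - i

-- first-pair scan starting from a given previous amino acid
def pvFirstPair (prev : Char) : List Char → Bool
  | [] => false
  | c :: t => ((prev == 'D' || prev == 'E') && c == 'P') || pvFirstPair c t

lemma pvFoldDE_eq (d : Bool) (l : List Char) (prev : Char) (flag : Bool) :
    (l.foldl (pvStepDE d) (prev, flag)).2 = (flag || (d && pvFirstPair prev l)) := by
  induction l generalizing prev flag with
  | nil => simp [pvFirstPair]
  | cons c t ih =>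
    rw [List.foldl_cons, pvStepDE, ih, pvFirstPair]
    cases d <;> cases flag <;> simp [Bool.and_or_distrib_left, Bool.or_assoc]

lemma pvFirstPair_cons_eq_scanPairs (a : Char) (t : List Char) :
    pvFirstPair a t = pvScanPairs (a :: t) := by
  induction t generalizing a with
  | nil => simp [pvFirstPair, pvScanPairs]
  | cons b t ih => rw [pvFirstPair, ih, pvScanPairs]

lemma pvFirstPair_sentinel (l : List Char) : pvFirstPair '_' l = pvScanPairs l := by
  cases l with
  | nil => rfl
  | cons c t => rw [pvFirstPair, pvFirstPair_cons_eq_scanPairs]; simp [pvScanPairs]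

lemma pvFold4 (d : Bool) (l : List Char) (s1 s2 s3 : Nat × Nat) (s4 : Char × Bool) :
    l.foldl
      (fun (st : (Nat × Nat) × (Nat × Nat) × (Nat × Nat) × (Char × Bool)) a =>
        (pvStepRun 'P' st.1 a, pvStepRun 'K' st.2.1 a, pvStepRun 'R' st.2.2.1 a,
          pvStepDE d st.2.2.2 a)) (s1, s2, s3, s4)
    = (l.foldl (pvStepRun 'P') s1, l.foldl (pvStepRun 'K') s2, l.foldl (pvStepRun 'R') s3,
        l.foldl (pvStepDE d) s4) := by
  induction l generalizing s1 s2 s3 s4 with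
  | nil => rfl
  | cons c t ih => simp only [List.foldl_cons]; rw [ih]

-- B's combined fold splits into the four independent folds
lemma pvAltFold_eq (codons : List String) :
    codons.foldl
      (fun (st : (Nat × Nat) × (Nat × Nat) × (Nat × Nat) × (Char × Bool)) c =>
        (pvStepRun 'P' st.1 (pvAA c),
          pvStepRun 'K' st.2.1 (pvAA c),
          pvStepRun 'R' st.2.2.1 (pvAA c),
          pvStepDE d st.2.2.2 (pvAA c)))
      ((0, 0), (0, 0), (0, 0), ('_', false))
    = (pvRunFold 'P' (codons.map pvAA), pvRunFold 'K' (codons.map pvAA),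
        pvRunFold 'R' (codons.map pvAA),
        (codons.map pvAA).foldl (pvStepDE d) ('_', false)) := by
  rw [show (codons.foldl
      (fun (st : (Nat × Nat) × (Nat × Nat) × (Nat × Nat) × (Char × Bool)) c =>
        (pvStepRun 'P' st.1 (pvAA c),
          pvStepRun 'K' st.2.1 (pvAA c),
          pvStepRun 'R' st.2.2.1 (pvAA c),
          pvStepDE d st.2.2.2 (pvAA c)))
      ((0, 0), (0, 0), (0, 0), ('_', false)))
    = ((codons.map pvAA).foldl
      (fun (st : (Nat × Nat) × (Nat × Nat) × (Nat × Nat) × (Char × Bool)) a =>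
        (pvStepRun 'P' st.1 a,
          pvStepRun 'K' st.2.1 a,
          pvStepRun 'R' st.2.2.1 a,
          pvStepDE d st.2.2.2 a))
      ((0, 0), (0, 0), (0, 0), ('_', false))) from
    (@List.foldl_map String Char ((Nat × Nat) × (Nat × Nat) × (Nat × Nat) × (Char × Bool)) pvAA
      (fun st a =>
        (pvStepRun 'P' st.1 a,
          pvStepRun 'K' st.2.1 a,
          pvStepRun 'R' st.2.2.1 a,
          pvStepDE d st.2.2.2 a))
      codons ((0, 0), (0, 0), (0, 0), ('_', false))).symm]
  rw [pvFold4]; rfl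

-- ===== VERDICT (by name: the statement is the Claim_ definition above) =====
theorem flag_stall_codon_motifs_spec : Claim_equal_flag_stall_codon_motifs := by
  intro codons proline_runs polybasic_min de_to_p _
  unfold Spec_flag_stall_codon_motifs
  unfold flag_stall_codon_motifs flag_stall_codon_motifs_alt
  rw [pvA_aa_eq, pvAltFold_eq]
  have hguard : ∀ (M : Nat), (if polybasic_min > 1 then (decide (polybasic_min ≤ (M : Int))) else false)
      = (decide (1 < polybasic_min) && decide (polybasic_min ≤ (M : Int))) := by
    intro M; by_cases h : polybasic_min > 1 <;> simp [h]
  have hde : ∀ (x : Bool), (if de_to_p then x else false) = (de_to_p && x) := by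
    intro x; cases de_to_p <;> rfl
  simp only [pvIsIn_repeat_eq, pvDeScanA_eq_scanPairs, List.drop_zero,
    pvFoldDE_eq, pvFirstPair_sentinel, Bool.false_or, hguard, hde]
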